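-- pv_equiv track=rewrite | github.com/transitland/transitland-atlas | scripts/compare-feed-urls.py | routes_cell
-- ===== SOURCE A (Python) =====
-- ROUTE_TYPE_NAMES = {
--     0: "Tram/Streetcar",
--     1: "Subway/Metro",
--     2: "Rail",
--     3: "Bus",
--     4: "Ferry",
--     5: "Cable tram",
--     6: "Gondola/Aerial lift",
--     7: "Funicular",
--     11: "Trolleybus",
--     12: "Monorail",
-- }
--
-- def routes_cell(data: dict) -> str:
--     routes = (data.get("details") or {}).get("routes")
--     if routes is None:
--         return "N/A"
--     if not routes:
--         return "0 routes"
--     counts: dict[str, int] = {}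
--     for r in routes:
--         rt = r.get("route_type")
--         name = ROUTE_TYPE_NAMES.get(rt, f"Type {rt}")
--         counts[name] = counts.get(name, 0) + 1
--     lines = [f"Total: {len(routes)}"]
--     for name, count in sorted(counts.items()):
--         lines.append(f"  {name}: {count}")
--     return "\n".join(lines)
-- ===== SOURCE B (Python) =====
-- ROUTE_TYPE_NAMES = {
--     0: "Tram/Streetcar",
--     1: "Subway/Metro",
--     2: "Rail",
--     3: "Bus",
--     4: "Ferry",
--     5: "Cable tram",
--     6: "Gondola/Aerial lift",
--     7: "Funicular",
--     11: "Trolleybus",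
--     12: "Monorail",
-- }
--
-- def routes_cell(data: dict) -> str:
--     routes = (data.get("details") or {}).get("routes")
--     if routes is None:
--         return "N/A"
--     if not routes:
--         return "0 routes"
--     names = sorted(
--         ROUTE_TYPE_NAMES.get(r.get("route_type"), f"Type {r.get('route_type')}")
--         for r in routes
--     )
--     lines = [f"Total: {len(routes)}"]
--     i = 0
--     n = len(names)
--     while i < n:
--         j = i + 1
--         while j < n and names[j] == names[i]:
--             j += 1
--         lines.append(f"  {names[i]}: {j - i}")
--         i = j
--     return "\n".join(lines)
-- ===== Notes on version B (the rewrite author's own statement) =====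
-- stated objective: alternative
-- what changed: Replaces the hash-map count accumulation plus key-sort of items with a map-to-names pass, one sort of the name list, and an adjacent-run scan that emits each group's line directly.
import Mathlib
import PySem

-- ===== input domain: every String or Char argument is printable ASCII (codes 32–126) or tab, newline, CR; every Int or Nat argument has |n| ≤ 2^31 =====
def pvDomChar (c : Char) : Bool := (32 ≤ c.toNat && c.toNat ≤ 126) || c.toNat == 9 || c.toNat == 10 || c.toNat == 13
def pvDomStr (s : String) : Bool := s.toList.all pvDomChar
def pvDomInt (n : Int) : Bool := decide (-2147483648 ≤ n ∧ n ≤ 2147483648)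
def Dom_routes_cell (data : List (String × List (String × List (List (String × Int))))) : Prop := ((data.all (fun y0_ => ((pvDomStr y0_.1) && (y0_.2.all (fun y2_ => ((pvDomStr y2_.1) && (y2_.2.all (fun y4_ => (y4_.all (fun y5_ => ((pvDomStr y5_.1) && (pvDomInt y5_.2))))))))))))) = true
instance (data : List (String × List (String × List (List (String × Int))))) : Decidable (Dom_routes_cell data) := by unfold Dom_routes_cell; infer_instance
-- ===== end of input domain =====

-- B replaces A's dict-based counting + key-sort of the (name, count) items by sorting the full
-- name list once and scanning adjacent equal runs; same return value, similar cost (alternative).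

-- ===== PORT A =====
-- shared module constant ROUTE_TYPE_NAMES
def pvRouteTypeNames : PySem.Dict Int String := PySem.Dict.ofList
  [(0, "Tram/Streetcar"), (1, "Subway/Metro"), (2, "Rail"), (3, "Bus"), (4, "Ferry"),
   (5, "Cable tram"), (6, "Gondola/Aerial lift"), (7, "Funicular"), (11, "Trolleybus"),
   (12, "Monorail")]

-- ROUTE_TYPE_NAMES.get(rt, f"Type {rt}") with rt = r.get("route_type") : Option Int
-- (rt = None formats as "Type None"); the same expression occurs in both Pythons.
def pvRouteName (rt : Option Int) : String :=
  match rt with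
  | none => "Type None"
  | some n => PySem.Dict.getD pvRouteTypeNames n ("Type " ++ PySem.Int.toStr n)

-- (data.get("details") or {}).get("routes") — identical first line of both Pythons.
-- 'or {}': a missing or empty (falsy) details dict is replaced by {}; .get on either yields the
-- same 'none' as Python's None, so the 'some det' branch passes det through unchanged.
def pvRoutesOf (data : List (String × List (String × List (List (String × Int))))) :
    Option (List (List (String × Int))) :=
  match (PySem.Dict.ofList data).get? "details" with
  | none => (PySem.Dict.ofList ([] : List (String × List (List (String × Int))))).get? "routes"
  | some det => (PySem.Dict.ofList det).get? "routes"

def routes_cell (data : List (String × List (String × List (List (String × Int))))) : String :=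
  match pvRoutesOf data with
  | none => "N/A"
  | some routes =>
    if routes = [] then "0 routes"
    else
      let counts : PySem.Dict String Int := routes.foldl (fun d r =>
        let name := pvRouteName ((PySem.Dict.ofList r).get? "route_type")
        d.insert name (d.getD name 0 + 1)) PySem.Dict.empty
      let lines : List String := ["Total: " ++ PySem.Int.toStr (routes.length : Int)]
      let lines := (PySem.List.sorted2 counts.items (fun p => p.1) (fun p => p.2) false).foldl
        (fun ls p => ls ++ ["  " ++ p.1 ++ ": " ++ PySem.Int.toStr p.2]) lines
      PySem.Str.join "\n" lines

-- ===== PORT B =====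
-- the index while-loop of Source B: each outer step emits one run of equal adjacent names
-- (j - i = 1 + length of the equal prefix of the tail) and continues at the run's end.
def pvRunLines : List String → List String
  | [] => []
  | x :: t =>
    ("  " ++ x ++ ": " ++ PySem.Int.toStr (1 + ((t.takeWhile (fun y => y == x)).length : Int)))
      :: pvRunLines (t.drop (t.takeWhile (fun y => y == x)).length)
termination_by s => s.length
decreasing_by simp [List.length_drop]

def routes_cell_alt (data : List (String × List (String × List (List (String × Int))))) : String :=
  match pvRoutesOf data with
  | none => "N/A"
  | some routes =>
    if routes = [] then "0 routes"
    else
      let names := PySem.List.sorted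
        (routes.map (fun r => pvRouteName ((PySem.Dict.ofList r).get? "route_type")))
        (fun x => x) false
      PySem.Str.join "\n"
        (("Total: " ++ PySem.Int.toStr (routes.length : Int)) :: pvRunLines names)

-- ===== PRECONDITION & SPEC =====
def Spec_routes_cell (data : List (String × List (String × List (List (String × Int))))) (out : String) : Prop := out = routes_cell_alt data
instance (data : List (String × List (String × List (List (String × Int))))) (out : String) : Decidable (Spec_routes_cell data out) := by unfold Spec_routes_cell; infer_instance

-- ===== CLAIM (what is proved, stated in full; the proofs are below) =====
def Claim_equal_routes_cell : Prop := ∀ (data : List (String × List (String × List (List (String × Int))))), Dom_routes_cell data → Spec_routes_cell data (routes_cell data)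

-- ===== LEMMAS AND PROOFS =====

-- proof-side pair view of pvRunLines: the (name, run length) pairs
def pvRuns : List String → List (String × Int)
  | [] => []
  | x :: t =>
    (x, 1 + ((t.takeWhile (fun y => y == x)).length : Int))
      :: pvRuns (t.drop (t.takeWhile (fun y => y == x)).length)
termination_by s => s.length
decreasing_by simp [List.length_drop]

lemma pvRunLines_eq_map (s : List String) :
    pvRunLines s = (pvRuns s).map (fun p => "  " ++ p.1 ++ ": " ++ PySem.Int.toStr p.2) := by
  induction s using pvRuns.induct with
  | case1 => simp [pvRunLines, pvRuns]
  | case2 x t ih => rw [pvRunLines, pvRuns, List.map_cons, ih]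

lemma foldl_append_map {α : Type} (f : α → String) :
    ∀ (l : List α) (acc : List String),
      l.foldl (fun ls x => ls ++ [f x]) acc = acc ++ l.map f
  | [], acc => by simp
  | x :: l, acc => by
    simp only [List.foldl_cons, List.map_cons]
    rw [foldl_append_map f l (acc ++ [f x])]
    simp

lemma insertBy_congr {α : Type} (b1 b2 : α → α → Bool) (x : α) :
    ∀ ys : List α, (∀ y ∈ ys, b1 x y = b2 x y) →
      PySem.List.insertBy b1 x ys = PySem.List.insertBy b2 x ys
  | [], _ => rfl
  | y :: ys, h => by
    simp only [PySem.List.insertBy]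
    rw [h y (List.mem_cons_self ..)]
    by_cases hb : b2 x y = true
    · simp [hb]
    · simp only [Bool.not_eq_true] at hb
      simp [hb, insertBy_congr b1 b2 x ys (fun z hz => h z (List.mem_cons_of_mem _ hz))]

lemma foldl_insertBy_congr {α : Type} (b1 b2 : α → α → Bool) (S : List α)
    (hS : ∀ a ∈ S, ∀ c ∈ S, b1 a c = b2 a c) :
    ∀ (xs acc : List α), (∀ a ∈ xs, a ∈ S) → (∀ a ∈ acc, a ∈ S) →
      xs.foldl (fun acc x => PySem.List.insertBy b1 x acc) acc
        = xs.foldl (fun acc x => PySem.List.insertBy b2 x acc) acc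
  | [], acc, _, _ => rfl
  | x :: xs, acc, hxs, hacc => by
    simp only [List.foldl_cons]
    rw [insertBy_congr b1 b2 x acc
      (fun y hy => hS x (hxs x (List.mem_cons_self ..)) y (hacc y hy))]
    exact foldl_insertBy_congr b1 b2 S hS xs _
      (fun a ha => hxs a (List.mem_cons_of_mem _ ha))
      (fun a ha => by
        rcases (PySem.List.mem_insertBy ..).1 ha with h | h
        · exact h ▸ hxs x (List.mem_cons_self ..)
        · exact hacc a h)

-- with pairwise-distinct first components, Python's tuple sort is the sort by first component
lemma sorted2_eq_sorted_fst (xs : List (String × Int))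
    (hnd : (xs.map Prod.fst).Nodup) :
    PySem.List.sorted2 xs (fun p => p.1) (fun p => p.2) false
      = PySem.List.sorted xs (fun p => p.1) false := by
  have hinj : ∀ a ∈ xs, ∀ c ∈ xs, a.1 = c.1 → a = c := by
    intro a ha c hc h1
    exact List.inj_on_of_nodup_map hnd ha hc h1
  show xs.foldl (fun acc x => PySem.List.insertBy
      (fun a b => decide (a.1 < b.1) || (!decide (b.1 < a.1) && decide (a.2 < b.2))) x acc) []
    = xs.foldl (fun acc x => PySem.List.insertBy (fun a b => decide (a.1 < b.1)) x acc) []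
  apply foldl_insertBy_congr _ _ xs _ xs [] (fun a ha => ha) (by simp)
  intro a ha c hc
  by_cases h1 : a.1 = c.1
  · have : a = c := hinj a ha c hc h1
    subst this
    simp
  · rcases lt_or_gt_of_ne h1 with h | h
    · simp [h, not_lt_of_gt h]
    · simp [h, not_lt_of_gt h]

-- facts about one run of a ≤-sorted list
lemma run_not_mem_drop {x : String} {t : List String}
    (hxle : ∀ z ∈ t, x ≤ z) (ht : t.Pairwise (· ≤ ·)) :
    x ∉ t.dropWhile (fun y => y == x) := by
  intro hx
  cases hdwc : t.dropWhile (fun y => y == x) with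
  | nil => rw [hdwc] at hx; exact absurd hx (List.not_mem_nil)
  | cons y rest =>
    have hyx : (fun y => y == x) y = false := by
      have := List.head?_dropWhile_not (fun y => y == x) t
      rw [hdwc] at this
      simpa using this
    have hyne : y ≠ x := by simpa using hyx
    rw [hdwc] at hx
    have hymem : y ∈ t := (List.dropWhile_sublist (fun y => y == x)).mem (hdwc ▸ List.mem_cons_self ..)
    rcases List.mem_cons.1 hx with h | h
    · exact hyne h.symm
    · have hpair : (y :: rest).Pairwise (· ≤ ·) :=
        hdwc ▸ List.Pairwise.sublist (List.dropWhile_sublist _) ht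
      have hylex : y ≤ x := (List.pairwise_cons.1 hpair).1 x h
      exact hyne (le_antisymm hylex (hxle y hymem))

lemma run_takeWhile_all {x : String} {t : List String} :
    ∀ y ∈ t.takeWhile (fun y => y == x), y = x := by
  intro y hy
  simpa using List.mem_takeWhile_imp hy

lemma run_count {x : String} {t : List String}
    (hxle : ∀ z ∈ t, x ≤ z) (ht : t.Pairwise (· ≤ ·)) :
    t.count x = (t.takeWhile (fun y => y == x)).length := by
  conv_lhs => rw [← List.takeWhile_append_dropWhile (p := fun y => y == x) (l := t)]
  rw [List.count_append]
  have h1 : (t.takeWhile (fun y => y == x)).count x = (t.takeWhile (fun y => y == x)).length :=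
    List.count_eq_length.2 (fun b hb => (run_takeWhile_all b hb).symm)
  have h2 : (t.dropWhile (fun y => y == x)).count x = 0 :=
    List.count_eq_zero.2 (run_not_mem_drop hxle ht)
  omega

lemma drop_length_takeWhile {α : Type} (p : α → Bool) :
    ∀ t : List α, t.drop (t.takeWhile p).length = t.dropWhile p
  | [] => rfl
  | y :: t => by
    by_cases hy : p y = true
    · simp [hy, drop_length_takeWhile p t]
    · simp [hy]

lemma run_drop_eq {x : String} {t : List String} :
    t.drop (t.takeWhile (fun y => y == x)).length = t.dropWhile (fun y => y == x) :=
  drop_length_takeWhile _ t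

lemma mem_pvRuns : ∀ (s : List String), s.Pairwise (· ≤ ·) →
    ∀ p : String × Int, (p ∈ pvRuns s ↔ p.1 ∈ s ∧ p.2 = (s.count p.1 : Int)) := by
  intro s
  induction s using pvRuns.induct with
  | case1 => intro _ p; simp [pvRuns]
  | case2 x t ih =>
    intro hp p
    have hxle : ∀ z ∈ t, x ≤ z := (List.pairwise_cons.1 hp).1
    have ht : t.Pairwise (· ≤ ·) := (List.pairwise_cons.1 hp).2
    have hdw : (t.dropWhile (fun y => y == x)).Pairwise (· ≤ ·) :=
      List.Pairwise.sublist (List.dropWhile_sublist _) ht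
    have hxdw : x ∉ t.dropWhile (fun y => y == x) := run_not_mem_drop hxle ht
    have hcnt : t.count x = (t.takeWhile (fun y => y == x)).length := run_count hxle ht
    have ihs := run_drop_eq (x := x) (t := t) ▸ ih
    have ihp := ihs hdw p
    rw [pvRuns, run_drop_eq, List.mem_cons, ihp]
    have hsplit : ∀ z : String, z ∈ t ↔
        z ∈ t.takeWhile (fun y => y == x) ∨ z ∈ t.dropWhile (fun y => y == x) := by
      intro z
      conv_lhs => rw [← List.takeWhile_append_dropWhile (p := fun y => y == x) (l := t)]
      exact List.mem_append
    by_cases hpx : p.1 = x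
    · have hnd : p.1 ∉ t.dropWhile (fun y => y == x) := hpx ▸ hxdw
      constructor
      · rintro (h | ⟨hm, _⟩)
        · refine ⟨by simp [h], ?_⟩
          rw [h]
          simp [hcnt]
          omega
        · exact absurd hm hnd
      · rintro ⟨_, hc⟩
        left
        have : (((x :: t).count p.1 : Nat) : Int) = 1 + ((t.takeWhile (fun y => y == x)).length : Int) := by
          simp [hpx, hcnt]
          omega
        rw [this] at hc
        exact Prod.ext hpx hc
    · have h1 : p ≠ (x, 1 + ((t.takeWhile (fun y => y == x)).length : Int)) := by
        intro h; exact hpx (by rw [h])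
      have htwn : p.1 ∉ t.takeWhile (fun y => y == x) := fun h => hpx (run_takeWhile_all _ h)
      have hmem : p.1 ∈ x :: t ↔ p.1 ∈ t.dropWhile (fun y => y == x) := by
        rw [List.mem_cons, hsplit p.1]
        constructor
        · rintro (h | h | h)
          · exact absurd h hpx
          · exact absurd h htwn
          · exact h
        · intro h; right; right; exact h
      have hceq : (x :: t).count p.1 = (t.dropWhile (fun y => y == x)).count p.1 := by
        have hx0 : (t.takeWhile (fun y => y == x)).count p.1 = 0 := List.count_eq_zero.2 htwn
        have : t.count p.1 = (t.takeWhile (fun y => y == x)).count p.1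
            + (t.dropWhile (fun y => y == x)).count p.1 := by
          conv_lhs => rw [← List.takeWhile_append_dropWhile (p := fun y => y == x) (l := t)]
          exact List.count_append ..
        simp [List.count_cons, this, hx0]
        exact fun h => hpx h.symm
      rw [hmem, hceq]
      simp [h1]

lemma pairwise_pvRuns : ∀ (s : List String), s.Pairwise (· ≤ ·) →
    (pvRuns s).Pairwise (fun a b => a.1 < b.1) := by
  intro s
  induction s using pvRuns.induct with
  | case1 => intro _; simp [pvRuns]
  | case2 x t ih =>
    intro hp
    have hxle : ∀ z ∈ t, x ≤ z := (List.pairwise_cons.1 hp).1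
    have ht : t.Pairwise (· ≤ ·) := (List.pairwise_cons.1 hp).2
    have hdw : (t.dropWhile (fun y => y == x)).Pairwise (· ≤ ·) :=
      List.Pairwise.sublist (List.dropWhile_sublist _) ht
    have hxdw : x ∉ t.dropWhile (fun y => y == x) := run_not_mem_drop hxle ht
    have ihs := run_drop_eq (x := x) (t := t) ▸ ih
    rw [pvRuns, run_drop_eq, List.pairwise_cons]
    refine ⟨?_, ihs hdw⟩
    intro q hq
    have hq1 : q.1 ∈ t.dropWhile (fun y => y == x) :=
      ((mem_pvRuns _ hdw q).1 hq).1
    have hq1t : q.1 ∈ t := (List.dropWhile_sublist _).mem hq1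
    show x < q.1
    exact lt_of_le_of_ne (hxle q.1 hq1t) (fun h => hxdw (h ▸ hq1))

-- the heart: sorted(counter(ns).items()) equals the run grouping of sorted(ns)
lemma sorted_counter_eq_pvRuns (ns : List String) :
    PySem.List.sorted2 (PySem.Dict.counter ns).items (fun p => p.1) (fun p => p.2) false
      = pvRuns (PySem.List.sorted ns (fun x => x) false) := by
  set s := PySem.List.sorted ns (fun x => x) false with hs
  have hsp : s.Pairwise (· ≤ ·) := PySem.List.sorted_pairwise ns (fun x => x)
  have hsperm : s.Perm ns := PySem.List.sorted_perm ns (fun x => x) false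
  have hitems : (PySem.Dict.counter ns).items
      = (PySem.Set.ofList ns).map (fun k => (k, (ns.count k : Int))) :=
    PySem.Dict.items_counter ns
  have hndfst : ((PySem.Dict.counter ns).items.map Prod.fst).Nodup := by
    rw [hitems, List.map_map]
    have : (Prod.fst ∘ fun k => (k, (ns.count k : Int))) = id := rfl
    rw [this, List.map_id]
    exact PySem.Set.nodup_ofList ns
  rw [sorted2_eq_sorted_fst _ hndfst]
  apply PySem.List.sorted_eq_of_perm_of_pairwise_lt
  · -- permutation
    have hnd1 : (pvRuns s).Nodup := by
      have := pairwise_pvRuns s hsp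
      exact this.imp (fun {a b} h => fun he => absurd (congrArg Prod.fst he) (ne_of_lt h))
    have hnd2 : ((PySem.Dict.counter ns).items).Nodup := by
      rw [hitems]
      exact (PySem.Set.nodup_ofList ns).map
        (fun a b h => congrArg Prod.fst h)
    rw [List.perm_ext_iff_of_nodup hnd1 hnd2]
    intro p
    rw [mem_pvRuns s hsp p, hitems, List.mem_map]
    constructor
    · rintro ⟨hm, hc⟩
      refine ⟨p.1, (PySem.Set.mem_ofList ns p.1).2 (hsperm.mem_iff.1 hm), ?_⟩
      rw [hsperm.count_eq] at hc
      exact Prod.ext_iff.2 ⟨rfl, hc.symm⟩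
    · rintro ⟨k, hk, he⟩
      have h1 : p.1 = k := by rw [← he]
      subst h1
      refine ⟨hsperm.mem_iff.2 ((PySem.Set.mem_ofList ns p.1).1 hk), ?_⟩
      rw [hsperm.count_eq]
      rw [← he]
  · exact pairwise_pvRuns s hsp

-- ===== VERDICT (by name: the statement is the Claim_ definition above) =====
theorem routes_cell_spec : Claim_equal_routes_cell := by
  intro data _
  unfold Spec_routes_cell routes_cell routes_cell_alt
  cases pvRoutesOf data with
  | none => rfl
  | some routes =>
    by_cases hr : routes = []
    · simp [hr]
    · simp only [hr, if_false]
      set ns := routes.map (fun r => pvRouteName ((PySem.Dict.ofList r).get? "route_type")) with hns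
      have hcounts : routes.foldl (fun d r =>
          let name := pvRouteName ((PySem.Dict.ofList r).get? "route_type")
          d.insert name (d.getD name 0 + 1)) PySem.Dict.empty
          = PySem.Dict.counter ns := by
        rw [hns, ← PySem.Dict.foldl_insert_getD_add_one_eq_counter, List.foldl_map]
      simp only [hcounts]
      rw [foldl_append_map, pvRunLines_eq_map, sorted_counter_eq_pvRuns]
      rfl
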